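-- pv_equiv track=rewrite | github.com/MichaelMcAleer/CollegeWork | Big Data Processing/Spark Core & Spark SQL/Solution/Pt2.py | map_taken_given
-- ===== SOURCE A (Python) =====
-- def map_taken_given(x):
--     """Transform value data, calculate the amount of bikes taken and given back
--     between intervals.
--
--     :param x: element from dataset -- RDD element
--     :return: bikes taken, bikes given -- tuple
--     """
--     # Instantiate interval list and taken/given counters
--     x, taken, given = list(x), 0, 0
--     # For every interval except for the last
--     for i in range(0, len(x) - 1):
--         # Get the current interval and the next interval in the list for
--         # comparison
--         current_cnt, nex_cnt = x[i][1], x[i + 1][1]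
--         # If the difference results in a positive number, bikes have been taken
--         if (current_cnt - nex_cnt) > 0:
--             # Increment bikes taken counter by difference
--             taken += (current_cnt - nex_cnt)
--         # If the difference results in a negative number, bikes have been given
--         if (current_cnt - nex_cnt) < 0:
--             # Increment bikes given counter by absolute difference
--             given += abs(current_cnt - nex_cnt)
--
--     return tuple([taken, given])
-- ===== SOURCE B (Python) =====
-- def map_taken_given(x):
--     """Single-accumulator re-implementation: sum only the positive consecutive
--     drops ('taken') in one zip pass, then derive 'given' from the telescoping
--     identity taken - given = first_count - last_count."""
--     x = list(x)
--     if len(x) < 2: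
--         return (0, 0)
--     taken = 0
--     for cur, nxt in zip(x, x[1:]):
--         d = cur[1] - nxt[1]
--         if d > 0:
--             taken += d
--     return (taken, taken - (x[0][1] - x[-1][1]))
-- ===== Notes on version B (the rewrite author's own statement) =====
-- stated objective: alternative
-- what changed: Replaces A's index-based loop with two running sums by a single zip pass that accumulates only the positive differences; 'given' is then derived in closed form from the telescoping identity taken - given = x[0][1] - x[-1][1].
import Mathlib
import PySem

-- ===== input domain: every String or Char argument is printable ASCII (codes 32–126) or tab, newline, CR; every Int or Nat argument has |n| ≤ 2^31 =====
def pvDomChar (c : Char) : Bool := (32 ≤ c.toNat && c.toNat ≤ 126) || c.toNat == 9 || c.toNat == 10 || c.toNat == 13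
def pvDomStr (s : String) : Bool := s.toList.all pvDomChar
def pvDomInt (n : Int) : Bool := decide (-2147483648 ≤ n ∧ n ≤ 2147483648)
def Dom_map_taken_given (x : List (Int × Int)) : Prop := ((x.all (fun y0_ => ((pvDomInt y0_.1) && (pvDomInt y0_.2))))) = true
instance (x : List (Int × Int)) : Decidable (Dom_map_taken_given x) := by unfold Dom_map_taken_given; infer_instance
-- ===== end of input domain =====

-- B changes the decomposition: one pass summing positive drops, 'given' derived by the telescoping identity (same cost, single accumulator).

-- ===== PORT A =====
-- Indices i and i+1 are always in range (0 ≤ i < len-1), so pyGetD with a dummy default is exact here.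
def map_taken_given (x : List (Int × Int)) : Int × Int :=
  (PySem.List.pyRange 0 ((x.length : Int) - 1) 1).foldl
    (fun (tg : Int × Int) (i : Int) =>
      let current_cnt := (PySem.List.pyGetD x i (0, 0)).2
      let nex_cnt := (PySem.List.pyGetD x (i + 1) (0, 0)).2
      let tg := if current_cnt - nex_cnt > 0 then (tg.1 + (current_cnt - nex_cnt), tg.2) else tg
      if current_cnt - nex_cnt < 0 then (tg.1, tg.2 + |current_cnt - nex_cnt|) else tg)
    (0, 0)

-- ===== PORT B =====
def map_taken_given_alt (x : List (Int × Int)) : Int × Int :=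
  match x with
  | [] => (0, 0)
  | [_] => (0, 0)
  | a :: b :: rest =>
    let taken := ((a :: b :: rest).zip (b :: rest)).foldl
      (fun t p => let d := p.1.2 - p.2.2; if d > 0 then t + d else t) 0
    (taken, taken - (a.2 - (((a :: b :: rest)).getLast (by simp)).2))

-- ===== PRECONDITION & SPEC =====
def Spec_map_taken_given (x : List (Int × Int)) (out : Int × Int) : Prop := out = map_taken_given_alt x
instance (x : List (Int × Int)) (out : Int × Int) : Decidable (Spec_map_taken_given x out) := by unfold Spec_map_taken_given; infer_instance

-- ===== CLAIM (what is proved, stated in full; the proofs are below) =====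
def Claim_equal_map_taken_given : Prop := ∀ (x : List (Int × Int)), Dom_map_taken_given x → Spec_map_taken_given x (map_taken_given x)

-- ===== LEMMAS AND PROOFS =====

-- the body of A's loop, named for the proofs (definitionally the lambda in map_taken_given)
def pvStep (x : List (Int × Int)) (tg : Int × Int) (i : Int) : Int × Int :=
  let current_cnt := (PySem.List.pyGetD x i (0, 0)).2
  let nex_cnt := (PySem.List.pyGetD x (i + 1) (0, 0)).2
  let tg := if current_cnt - nex_cnt > 0 then (tg.1 + (current_cnt - nex_cnt), tg.2) else tg
  if current_cnt - nex_cnt < 0 then (tg.1, tg.2 + |current_cnt - nex_cnt|) else tg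

-- pairwise sums of positive drops / negative rises (proof-side characterisations)
def pvT : List (Int × Int) → Int
  | a :: b :: r => (if a.2 - b.2 > 0 then a.2 - b.2 else 0) + pvT (b :: r)
  | _ => 0

def pvG : List (Int × Int) → Int
  | a :: b :: r => (if a.2 - b.2 < 0 then |a.2 - b.2| else 0) + pvG (b :: r)
  | _ => 0

lemma pvStep_zero (a b : Int × Int) (r : List (Int × Int)) (t g : Int) :
    pvStep (a :: b :: r) (t, g) ((0 : Int) + ((0 : Nat) : Int)) =
      (t + (if a.2 - b.2 > 0 then a.2 - b.2 else 0),
       g + (if a.2 - b.2 < 0 then |a.2 - b.2| else 0)) := by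
  have e1 : (0 : Int) + ((0 : Nat) : Int) = ((0 : Nat) : Int) := by omega
  have e2 : ((0 : Int) + ((0 : Nat) : Int)) + 1 = ((1 : Nat) : Int) := by omega
  unfold pvStep
  rw [e2, e1, PySem.List.pyGetD_natCast, PySem.List.pyGetD_natCast]
  simp only [List.getD_cons_zero, List.getD_cons_succ]
  split_ifs <;> simp

lemma pvStep_shift (a : Int × Int) (y : List (Int × Int)) (tg : Int × Int) (k : Nat) :
    pvStep (a :: y) tg ((0 : Int) + ((Nat.succ k : Nat) : Int)) =
      pvStep y tg ((0 : Int) + ((k : Nat) : Int)) := by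
  have e1 : (0 : Int) + ((Nat.succ k : Nat) : Int) = (((k + 1 : Nat)) : Int) := by omega
  have e2 : ((0 : Int) + ((Nat.succ k : Nat) : Int)) + 1 = (((k + 2 : Nat)) : Int) := by omega
  have e3 : (0 : Int) + ((k : Nat) : Int) = ((k : Nat) : Int) := by omega
  have e4 : ((0 : Int) + ((k : Nat) : Int)) + 1 = (((k + 1 : Nat)) : Int) := by omega
  unfold pvStep
  rw [e2, e1, e4, e3, PySem.List.pyGetD_natCast, PySem.List.pyGetD_natCast,
      PySem.List.pyGetD_natCast, PySem.List.pyGetD_natCast]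
  simp [List.getD]

-- A's fold over range indices equals the pairwise recursion, for any start accumulator
lemma pvA_fold (x : List (Int × Int)) : ∀ (t g : Int),
    (List.range (x.length - 1)).foldl
      (fun (tg : Int × Int) (k : Nat) => pvStep x tg ((0 : Int) + (k : Int))) (t, g)
      = (t + pvT x, g + pvG x) := by
  induction x with
  | nil => intro t g; simp [pvT, pvG]
  | cons a x ih =>
    intro t g
    cases x with
    | nil => simp [pvT, pvG]
    | cons b r =>
      have hlen : (a :: b :: r).length - 1 = ((b :: r).length - 1) + 1 := by simp
      rw [hlen, List.range_succ_eq_map, List.foldl_cons, List.foldl_map, pvStep_zero]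
      rw [PySem.List.foldl_congr_mem (List.range ((b :: r).length - 1))
            (fun x (y : Nat) => pvStep (a :: b :: r) x ((0 : Int) + ((Nat.succ y : Nat) : Int)))
            (fun tg (k : Nat) => pvStep (b :: r) tg ((0 : Int) + ((k : Nat) : Int))) _
            (fun acc k _ => pvStep_shift a (b :: r) acc k)]
      rw [ih]
      simp only [pvT, pvG, Prod.mk.injEq]
      constructor <;> ring

-- A's result is the pair of pairwise sums
lemma pvA_char (x : List (Int × Int)) : map_taken_given x = (pvT x, pvG x) := by
  show (PySem.List.pyRange 0 ((x.length : Int) - 1) 1).foldl (pvStep x) (0, 0) = _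
  rw [PySem.List.pyRange_one]
  have : (((x.length : Int) - 1) - 0).toNat = x.length - 1 := by omega
  rw [this, List.foldl_map]
  simpa using pvA_fold x 0 0

-- B's zip fold is pvT
lemma pvB_zip (x : List (Int × Int)) : ∀ (t : Int),
    (x.zip x.tail).foldl (fun t p => let d := p.1.2 - p.2.2; if d > 0 then t + d else t) t
      = t + pvT x := by
  induction x with
  | nil => intro t; simp [pvT]
  | cons a x ih =>
    intro t
    cases x with
    | nil => simp [pvT]
    | cons b r =>
      simp only [List.tail_cons] at ih ⊢
      simp only [List.zip_cons_cons, List.foldl_cons]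
      rw [ih]
      simp only [pvT]
      split_ifs <;> ring

-- telescoping: taken - given over a nonempty list
lemma pv_telescope (x : List (Int × Int)) : ∀ (a : Int × Int) (h : (a :: x) ≠ []),
    pvT (a :: x) - pvG (a :: x) = a.2 - ((a :: x).getLast h).2 := by
  induction x with
  | nil => intro a h; simp [pvT, pvG]
  | cons b r ih =>
    intro a h
    have hb : (b :: r) ≠ [] := by simp
    have hlast : (a :: b :: r).getLast h = (b :: r).getLast hb := by
      simp [List.getLast_cons]
    rw [hlast]
    have hrec := ih b hb
    simp only [pvT, pvG]
    split_ifs with h1 h2 <;> first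
      | (rw [abs_of_neg (by omega)]; omega)
      | omega

-- ===== VERDICT (by name: the statement is the Claim_ definition above) =====
theorem map_taken_given_spec : Claim_equal_map_taken_given := by
  intro x _
  unfold Spec_map_taken_given
  rw [pvA_char]
  match x with
  | [] => simp [map_taken_given_alt, pvT, pvG]
  | [a] => simp [map_taken_given_alt, pvT, pvG]
  | a :: b :: r =>
    simp only [map_taken_given_alt]
    have hz := pvB_zip (a :: b :: r) 0
    simp only [List.tail_cons] at hz
    rw [hz]
    have ht := pv_telescope (b :: r) a (by simp)
    simp only [Prod.mk.injEq]
    constructor <;> omega
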